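-- pv_equiv track=rewrite | github.com/Harshal-Ahire/WayCode | waycode/waycode/utils/diff_generator.py | generate_side_by_side
-- ===== SOURCE A (Python) =====
-- def generate_side_by_side(original, refactored):
--     original_lines = original.splitlines()
--     refactored_lines = refactored.splitlines()
--
--     max_len = max(len(original_lines), len(refactored_lines))
--
--     result = []
--     result.append(f"{'ORIGINAL':<50} | {'REFACTORED':<50}")
--     result.append("-" * 103)
--
--     for i in range(max_len):
--         orig = original_lines[i] if i < len(original_lines) else ''
--         refac = refactored_lines[i] if i < len(refactored_lines) else ''
--
--         result.append(f"{orig:<50} | {refac:<50}")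
--
--     return '\n'.join(result)
-- ===== SOURCE B (Python) =====
-- def generate_side_by_side(original, refactored):
--     # Structural recursion on the two line lists: no max_len, no indices.
--     def rows(o, r):
--         if not o and not r:
--             return []
--         ho = o[0] if o else ''
--         hr = r[0] if r else ''
--         return [f"{ho:<50} | {hr:<50}"] + rows(o[1:], r[1:])
--
--     header = f"{'ORIGINAL':<50} | {'REFACTORED':<50}"
--     return '\n'.join([header, "-" * 103] + rows(original.splitlines(), refactored.splitlines()))
-- ===== Notes on version B (the rewrite author's own statement) =====
-- stated objective: alternative
-- what changed: B replaces A's index loop over range(max_len) with bounds-checked lookups by a structural recursion that consumes both line lists head-by-head until both are empty, maintaining no length or index counters.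
import Mathlib
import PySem

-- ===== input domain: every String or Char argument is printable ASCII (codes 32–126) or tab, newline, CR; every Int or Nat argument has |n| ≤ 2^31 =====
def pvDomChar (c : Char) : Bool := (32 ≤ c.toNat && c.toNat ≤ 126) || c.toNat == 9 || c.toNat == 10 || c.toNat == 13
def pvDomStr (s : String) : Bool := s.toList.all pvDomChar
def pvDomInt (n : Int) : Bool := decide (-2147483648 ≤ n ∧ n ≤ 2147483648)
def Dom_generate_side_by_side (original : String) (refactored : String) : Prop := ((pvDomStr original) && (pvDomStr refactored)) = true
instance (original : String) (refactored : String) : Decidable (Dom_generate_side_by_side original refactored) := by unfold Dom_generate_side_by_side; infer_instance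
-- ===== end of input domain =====

-- B replaces A's range(max_len) index loop with a structural recursion that
-- consumes both line lists head-by-head (alternative; same return value).

-- ===== PORT A =====
-- f"{s:<50}": left-justify to width 50 (no truncation)
def pvPadA (s : List Char) : List Char := s ++ List.replicate (50 - s.length) ' '
-- f"{orig:<50} | {refac:<50}"
def pvRowA (o r : List Char) : List Char := pvPadA o ++ [' ', '|', ' '] ++ pvPadA r

def generate_side_by_side (original : String) (refactored : String) : String :=
  let original_lines := PySem.Chars.splitlines original.toList
  let refactored_lines := PySem.Chars.splitlines refactored.toList
  let max_len : Int := max original_lines.length refactored_lines.length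
  let result : List (List Char) :=
    [pvRowA "ORIGINAL".toList "REFACTORED".toList, List.replicate 103 '-']
  let result := (PySem.List.pyRange 0 max_len 1).foldl (fun acc i =>
    let orig := if i < (original_lines.length : Int)
                then PySem.List.pyGetD original_lines i [] else []
    let refac := if i < (refactored_lines.length : Int)
                 then PySem.List.pyGetD refactored_lines i [] else []
    acc ++ [pvRowA orig refac]) result
  String.ofList (PySem.Chars.join ['\n'] result)

-- ===== PORT B =====
def pvPadB (s : List Char) : List Char := s ++ List.replicate (50 - s.length) ' '
def pvRowB (o r : List Char) : List Char := pvPadB o ++ [' ', '|', ' '] ++ pvPadB r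

-- B's helper `rows`: recursion on the two line lists until both are empty
def pvRows : List (List Char) → List (List Char) → List (List Char)
  | [], [] => []
  | ho :: o1, [] => pvRowB ho [] :: pvRows o1 []
  | [], hr :: r1 => pvRowB [] hr :: pvRows [] r1
  | ho :: o1, hr :: r1 => pvRowB ho hr :: pvRows o1 r1

def generate_side_by_side_alt (original : String) (refactored : String) : String :=
  let header := pvRowB "ORIGINAL".toList "REFACTORED".toList
  String.ofList (PySem.Chars.join ['\n']
    ([header, List.replicate 103 '-']
      ++ pvRows (PySem.Chars.splitlines original.toList)
                (PySem.Chars.splitlines refactored.toList)))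

-- ===== PRECONDITION & SPEC =====
def Spec_generate_side_by_side (original : String) (refactored : String) (out : String) : Prop := out = generate_side_by_side_alt original refactored
instance (original : String) (refactored : String) (out : String) : Decidable (Spec_generate_side_by_side original refactored out) := by unfold Spec_generate_side_by_side; infer_instance

-- ===== CLAIM (what is proved, stated in full; the proofs are below) =====
def Claim_equal_generate_side_by_side : Prop := ∀ (original : String) (refactored : String), Dom_generate_side_by_side original refactored → Spec_generate_side_by_side original refactored (generate_side_by_side original refactored)

-- ===== LEMMAS AND PROOFS =====

-- A's foldl unrolled into a map over the index range
theorem pvFoldl_rows (f : Int → List Char) (r : List Int) (acc : List (List Char)) :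
    r.foldl (fun acc i => acc ++ [f i]) acc = acc ++ r.map f := by
  induction r generalizing acc with
  | nil => simp
  | cons a t ih => simp [List.foldl, ih]

theorem pvRows_nil_right (ys : List (List Char)) :
    pvRows [] ys = (List.range ys.length).map (fun k => pvRowB [] (ys.getD k [])) := by
  induction ys with
  | nil => simp [pvRows]
  | cons h t ih =>
      simp only [pvRows, List.length_cons, List.range_succ_eq_map, List.map_cons,
        List.map_map]
      rw [ih]
      simp [Function.comp_def]

theorem pvRows_eq_rangeMap (xs ys : List (List Char)) :
    pvRows xs ys = (List.range (max xs.length ys.length)).map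
      (fun k => pvRowB (xs.getD k []) (ys.getD k [])) := by
  induction xs generalizing ys with
  | nil => simpa using pvRows_nil_right ys
  | cons h t ih =>
      cases ys with
      | nil =>
          simp only [pvRows, List.length_cons, List.length_nil, Nat.max_zero,
            List.range_succ_eq_map, List.map_cons, List.map_map]
          rw [ih []]
          simp
      | cons h' t' =>
          have : max (t.length + 1) (t'.length + 1) = max t.length t'.length + 1 := by omega
          simp only [pvRows, List.length_cons, this, List.range_succ_eq_map,
            List.map_cons, List.map_map]
          rw [ih t']
          simp [Function.comp_def]

theorem generate_side_by_side_eq (original refactored : String) :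
    generate_side_by_side original refactored
      = generate_side_by_side_alt original refactored := by
  unfold generate_side_by_side generate_side_by_side_alt
  set xs := PySem.Chars.splitlines original.toList with hxs
  set ys := PySem.Chars.splitlines refactored.toList with hys
  simp only [pvFoldl_rows]
  congr 2
  rw [pvRows_eq_rangeMap, PySem.List.pyRange_one]
  have hmax : ((max xs.length ys.length : Int) - 0).toNat = max xs.length ys.length := by
    omega
  rw [hmax, List.map_map]
  simp only [show pvRowA = pvRowB from rfl]
  congr 1
  apply List.map_congr_left
  intro k hk
  have hk' : k < max xs.length ys.length := List.mem_range.mp hk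
  simp only [Function.comp, zero_add]
  have hg : ∀ (zs : List (List Char)),
      (if (k : Int) < (zs.length : Int) then PySem.List.pyGetD zs (k : Int) [] else [])
        = zs.getD k [] := by
    intro zs
    by_cases h : k < zs.length
    · rw [if_pos (by exact_mod_cast h), PySem.List.pyGetD_natCast]
    · rw [if_neg (by exact_mod_cast h)]
      simp [List.getD_eq_getElem?_getD, List.getElem?_eq_none (Nat.le_of_not_lt h)]
  rw [hg xs, hg ys]

-- ===== VERDICT (by name: the statement is the Claim_ definition above) =====
theorem generate_side_by_side_spec : Claim_equal_generate_side_by_side := by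
  intro original refactored _
  unfold Spec_generate_side_by_side
  exact generate_side_by_side_eq original refactored
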